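-- pv_equiv track=rewrite | github.com/ChaosAIs/dots-ocr-app | backend/rag_service/chunking/strategy_executor.py | _filter_protected_splits
-- ===== SOURCE A (Python) =====
-- from typing import Any, Dict, List, Optional, Pattern, Set, Tuple
--
-- def _filter_protected_splits(
--
--     split_points: List[int],
--     protected_ranges: List[Tuple[int, int]]
-- ) -> List[int]:
--     """
--     Remove split points that fall inside protected ranges.
--
--     Args:
--         split_points: List of potential split positions
--         protected_ranges: List of (start, end) protected ranges
--
--     Returns:
--         Filtered list of valid split points
--     """
--     def is_in_protected(pos: int) -> bool:
--         for start, end in protected_ranges: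
--             if start <= pos < end:
--                 return True
--         return False
--
--     return [p for p in split_points if not is_in_protected(p)]
-- ===== SOURCE B (Python) =====
-- def _filter_protected_splits(split_points, protected_ranges):
--     # Preprocess: drop empty ranges, sort by start, merge overlaps into
--     # disjoint sorted intervals; then each point needs only a short scan
--     # with early exit on the merged list.
--     rs = sorted((r for r in protected_ranges if r[0] < r[1]), key=lambda r: r[0])
--     merged = []
--     if rs:
--         cs, ce = rs[0]
--         for s, e in rs[1:]:
--             if s <= ce:
--                 if e > ce:
--                     ce = e
--             else:
--                 merged.append((cs, ce))
--                 cs, ce = s, e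
--         merged.append((cs, ce))
--
--     def _covered(p):
--         for s, e in merged:
--             if p < s:
--                 return False
--             if p < e:
--                 return True
--         return False
--
--     return [p for p in split_points if not _covered(p)]
-- ===== Notes on version B (the rewrite author's own statement) =====
-- stated objective: faster
-- what changed: Instead of scanning every protected range for every split point, B pre-sorts and merges the ranges into disjoint sorted intervals once and then checks each point against the merged list with an early exit.
import Mathlib
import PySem

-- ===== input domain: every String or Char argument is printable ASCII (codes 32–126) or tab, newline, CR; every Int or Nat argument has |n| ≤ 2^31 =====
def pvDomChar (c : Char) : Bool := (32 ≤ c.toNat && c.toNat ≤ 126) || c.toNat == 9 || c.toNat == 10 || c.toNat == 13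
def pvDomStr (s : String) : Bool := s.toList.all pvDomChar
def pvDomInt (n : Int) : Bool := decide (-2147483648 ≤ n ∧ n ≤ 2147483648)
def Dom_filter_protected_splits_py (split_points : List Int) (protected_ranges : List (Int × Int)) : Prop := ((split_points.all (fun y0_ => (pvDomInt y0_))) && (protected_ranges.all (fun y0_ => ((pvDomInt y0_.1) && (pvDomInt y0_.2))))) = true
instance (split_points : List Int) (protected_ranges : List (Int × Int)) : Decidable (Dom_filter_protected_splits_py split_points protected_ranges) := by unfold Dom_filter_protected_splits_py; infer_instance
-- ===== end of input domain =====

-- B merges the sorted protected ranges once and checks each point against the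
-- disjoint merged intervals with an early exit (preprocessing instead of a
-- full inner scan per point); return values proved equal on all inputs.

-- ===== PORT A =====
-- the inner 'is_in_protected' loop with early return
def pyIsInProtected (protected_ranges : List (Int × Int)) (pos : Int) : Bool :=
  match protected_ranges with
  | [] => false
  | (s, e) :: rest => if s ≤ pos ∧ pos < e then true else pyIsInProtected rest pos

def filter_protected_splits_py (split_points : List Int) (protected_ranges : List (Int × Int)) : List Int :=
  split_points.filter (fun p => ! pyIsInProtected protected_ranges p)

-- ===== PORT B =====
-- the 'for s, e in rs[1:]' merge loop of Source B, with (cs, ce) as the running interval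
def pvMergeGo (cs ce : Int) : List (Int × Int) → List (Int × Int)
  | [] => [(cs, ce)]
  | (s, e) :: rest =>
    if s ≤ ce then pvMergeGo cs (max ce e) rest
    else (cs, ce) :: pvMergeGo s e rest

-- 'merged' built from rs (empty if rs is empty)
def pvMerge : List (Int × Int) → List (Int × Int)
  | [] => []
  | (s, e) :: rest => pvMergeGo s e rest

-- the '_covered' loop with its two early returns
def pvCovered (p : Int) : List (Int × Int) → Bool
  | [] => false
  | (s, e) :: rest => if p < s then false else if p < e then true else pvCovered p rest

def filter_protected_splits_py_alt (split_points : List Int) (protected_ranges : List (Int × Int)) : List Int :=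
  let rs := PySem.List.sorted (protected_ranges.filter (fun r => decide (r.1 < r.2))) (fun r => r.1) false
  let merged := pvMerge rs
  split_points.filter (fun p => ! pvCovered p merged)

-- ===== PRECONDITION & SPEC =====
def Spec_filter_protected_splits_py (split_points : List Int) (protected_ranges : List (Int × Int)) (out : List Int) : Prop := out = filter_protected_splits_py_alt split_points protected_ranges
instance (split_points : List Int) (protected_ranges : List (Int × Int)) (out : List Int) : Decidable (Spec_filter_protected_splits_py split_points protected_ranges out) := by unfold Spec_filter_protected_splits_py; infer_instance

-- ===== CLAIM (what is proved, stated in full; the proofs are below) =====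
def Claim_equal_filter_protected_splits_py : Prop := ∀ (split_points : List Int) (protected_ranges : List (Int × Int)), Dom_filter_protected_splits_py split_points protected_ranges → Spec_filter_protected_splits_py split_points protected_ranges (filter_protected_splits_py split_points protected_ranges)

-- ===== LEMMAS AND PROOFS =====

-- A's inner loop computes containment in some range
theorem pyIsInProtected_iff (rs : List (Int × Int)) (p : Int) :
    pyIsInProtected rs p = true ↔ ∃ x ∈ rs, x.1 ≤ p ∧ p < x.2 := by
  induction rs with
  | nil => simp [pyIsInProtected]
  | cons hd tl ih =>
    obtain ⟨s, e⟩ := hd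
    simp only [pyIsInProtected, List.mem_cons]
    split_ifs with h
    · simp only [true_iff]
      exact ⟨(s, e), Or.inl rfl, h⟩
    · rw [ih]
      constructor
      · rintro ⟨x, hx, hc⟩; exact ⟨x, Or.inr hx, hc⟩
      · rintro ⟨x, hx, hc⟩
        rcases hx with rfl | hx
        · exact absurd hc h
        · exact ⟨x, hx, hc⟩

-- merging preserves the union of covered points
theorem pvMergeGo_cov (p : Int) (rest : List (Int × Int)) :
    ∀ cs ce : Int, (∀ x ∈ rest, cs ≤ x.1) →
    rest.Pairwise (fun a b => a.1 ≤ b.1) →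
    ((∃ x ∈ pvMergeGo cs ce rest, x.1 ≤ p ∧ p < x.2) ↔
      (cs ≤ p ∧ p < ce) ∨ ∃ x ∈ rest, x.1 ≤ p ∧ p < x.2) := by
  induction rest with
  | nil => intro cs ce _ _; simp [pvMergeGo]
  | cons hd tl ih =>
    intro cs ce hlb hpw
    obtain ⟨s, e⟩ := hd
    have hcs : cs ≤ s := hlb (s, e) (List.mem_cons_self ..)
    have hlb' : ∀ x ∈ tl, cs ≤ x.1 := fun x hx => hlb x (List.mem_cons_of_mem _ hx)
    have hpw' := (List.pairwise_cons.mp hpw).2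
    have hsd := (List.pairwise_cons.mp hpw).1
    simp only [pvMergeGo]
    split_ifs with h
    · rw [ih cs (max ce e) hlb' hpw']
      have : (cs ≤ p ∧ p < max ce e) ↔ ((cs ≤ p ∧ p < ce) ∨ (s ≤ p ∧ p < e)) := by
        rcases le_total ce e with h2 | h2 <;> simp [h2] <;> omega
      rw [this]
      simp only [List.mem_cons]
      constructor
      · rintro (h1 | ⟨x, hx, hc⟩)
        · rcases h1 with h1 | h1
          · exact Or.inl h1
          · exact Or.inr ⟨(s, e), Or.inl rfl, h1⟩
        · exact Or.inr ⟨x, Or.inr hx, hc⟩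
      · rintro (h1 | ⟨x, hx, hc⟩)
        · exact Or.inl (Or.inl h1)
        · rcases hx with rfl | hx
          · exact Or.inl (Or.inr hc)
          · exact Or.inr ⟨x, hx, hc⟩
    · have hlb2 : ∀ x ∈ tl, s ≤ x.1 := fun x hx => hsd x hx
      simp only [List.mem_cons]
      constructor
      · rintro ⟨x, hx, hc⟩
        rcases hx with rfl | hx
        · exact Or.inl hc
        · rcases (ih s e hlb2 hpw').mp ⟨x, hx, hc⟩ with h1 | ⟨y, hy, hc2⟩
          · exact Or.inr ⟨(s, e), Or.inl rfl, h1⟩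
          · exact Or.inr ⟨y, Or.inr hy, hc2⟩
      · rintro (h1 | ⟨x, hx, hc⟩)
        · exact ⟨(cs, ce), Or.inl rfl, h1⟩
        · rcases hx with rfl | hx
          · rcases (ih s e hlb2 hpw').mpr (Or.inl hc) with ⟨y, hy, hc2⟩
            exact ⟨y, Or.inr hy, hc2⟩
          · rcases (ih s e hlb2 hpw').mpr (Or.inr ⟨x, hx, hc⟩) with ⟨y, hy, hc2⟩
            exact ⟨y, Or.inr hy, hc2⟩

-- every start in the merged output is ≥ the running start
theorem pvMergeGo_lb (rest : List (Int × Int)) :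
    ∀ cs ce : Int, (∀ x ∈ rest, cs ≤ x.1) →
    rest.Pairwise (fun a b => a.1 ≤ b.1) →
    ∀ y ∈ pvMergeGo cs ce rest, cs ≤ y.1 := by
  induction rest with
  | nil => intro cs ce _ _ y hy; simp [pvMergeGo] at hy; simp [hy]
  | cons hd tl ih =>
    intro cs ce hlb hpw y hy
    obtain ⟨s, e⟩ := hd
    have hcs : cs ≤ s := hlb (s, e) (List.mem_cons_self ..)
    have hlb' : ∀ x ∈ tl, cs ≤ x.1 := fun x hx => hlb x (List.mem_cons_of_mem _ hx)
    have hpw' := (List.pairwise_cons.mp hpw).2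
    have hsd := (List.pairwise_cons.mp hpw).1
    simp only [pvMergeGo] at hy
    split_ifs at hy with h
    · exact ih cs (max ce e) hlb' hpw' y hy
    · rcases List.mem_cons.mp hy with rfl | hy
      · exact le_refl _
      · exact le_trans hcs (ih s e (fun x hx => hsd x hx) hpw' y hy)

-- the merged output is sorted by start
theorem pvMergeGo_pairwise (rest : List (Int × Int)) :
    ∀ cs ce : Int, (∀ x ∈ rest, cs ≤ x.1) →
    rest.Pairwise (fun a b => a.1 ≤ b.1) →
    (pvMergeGo cs ce rest).Pairwise (fun a b => a.1 ≤ b.1) := by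
  induction rest with
  | nil => intro cs ce _ _; simp [pvMergeGo]
  | cons hd tl ih =>
    intro cs ce hlb hpw
    obtain ⟨s, e⟩ := hd
    have hcs : cs ≤ s := hlb (s, e) (List.mem_cons_self ..)
    have hlb' : ∀ x ∈ tl, cs ≤ x.1 := fun x hx => hlb x (List.mem_cons_of_mem _ hx)
    have hpw' := (List.pairwise_cons.mp hpw).2
    have hsd := (List.pairwise_cons.mp hpw).1
    simp only [pvMergeGo]
    split_ifs with h
    · exact ih cs (max ce e) hlb' hpw'
    · refine List.pairwise_cons.mpr ⟨?_, ih s e (fun x hx => hsd x hx) hpw'⟩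
      intro y hy
      exact le_trans hcs (pvMergeGo_lb tl s e (fun x hx => hsd x hx) hpw' y hy)

-- the early-exit scan decides containment on a start-sorted list
theorem pvCovered_iff (p : Int) (M : List (Int × Int))
    (hpw : M.Pairwise (fun a b => a.1 ≤ b.1)) :
    pvCovered p M = true ↔ ∃ x ∈ M, x.1 ≤ p ∧ p < x.2 := by
  induction M with
  | nil => simp [pvCovered]
  | cons hd tl ih =>
    obtain ⟨s, e⟩ := hd
    have hsd := (List.pairwise_cons.mp hpw).1
    have hpw' := (List.pairwise_cons.mp hpw).2
    simp only [pvCovered, List.mem_cons]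
    split_ifs with h1 h2
    · simp only [false_iff]
      rintro ⟨x, hx, hc⟩
      rcases hx with rfl | hx
      · omega
      · have := hsd x hx; omega
    · simp only [true_iff]
      exact ⟨(s, e), Or.inl rfl, by omega⟩
    · rw [ih hpw']
      constructor
      · rintro ⟨x, hx, hc⟩; exact ⟨x, Or.inr hx, hc⟩
      · rintro ⟨x, hx, hc⟩
        rcases hx with rfl | hx
        · omega
        · exact ⟨x, hx, hc⟩

-- B's per-point test equals A's per-point test
theorem covered_eq (protected_ranges : List (Int × Int)) (p : Int) :
    pvCovered p (pvMerge (PySem.List.sorted (protected_ranges.filter (fun r => decide (r.1 < r.2))) (fun r => r.1) false))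
      = pyIsInProtected protected_ranges p := by
  set rs := PySem.List.sorted (protected_ranges.filter (fun r => decide (r.1 < r.2))) (fun r => r.1) false with hrs
  have hpw : rs.Pairwise (fun a b => a.1 ≤ b.1) := PySem.List.sorted_pairwise ..
  have hmem : ∀ x, x ∈ rs ↔ x ∈ protected_ranges ∧ x.1 < x.2 := by
    intro x
    rw [hrs, PySem.List.mem_sorted, List.mem_filter]
    simp
  have hcov : (∃ x ∈ pvMerge rs, x.1 ≤ p ∧ p < x.2) ↔ ∃ x ∈ rs, x.1 ≤ p ∧ p < x.2 := by
    cases hc : rs with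
    | nil => simp [pvMerge]
    | cons hd tl =>
      obtain ⟨s, e⟩ := hd
      rw [hc] at hpw
      have hsd := (List.pairwise_cons.mp hpw).1
      have hpw' := (List.pairwise_cons.mp hpw).2
      simp only [pvMerge]
      rw [pvMergeGo_cov p tl s e (fun x hx => hsd x hx) hpw']
      simp only [List.mem_cons]
      constructor
      · rintro (h1 | ⟨x, hx, hc⟩)
        · exact ⟨(s, e), Or.inl rfl, h1⟩
        · exact ⟨x, Or.inr hx, hc⟩
      · rintro ⟨x, hx, hc⟩
        rcases hx with rfl | hx
        · exact Or.inl hc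
        · exact Or.inr ⟨x, hx, hc⟩
  have hpwM : (pvMerge rs).Pairwise (fun a b => a.1 ≤ b.1) := by
    cases hc : rs with
    | nil => simp [pvMerge]
    | cons hd tl =>
      obtain ⟨s, e⟩ := hd
      rw [hc] at hpw
      exact pvMergeGo_pairwise tl s e (fun x hx => (List.pairwise_cons.mp hpw).1 x hx)
        (List.pairwise_cons.mp hpw).2
  rw [Bool.eq_iff_iff, pvCovered_iff p _ hpwM, pyIsInProtected_iff, hcov]
  constructor
  · rintro ⟨x, hx, hc⟩
    exact ⟨x, ((hmem x).mp hx).1, hc⟩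
  · rintro ⟨x, hx, hc⟩
    exact ⟨x, (hmem x).mpr ⟨hx, by omega⟩, hc⟩

-- ===== VERDICT (by name: the statement is the Claim_ definition above) =====
theorem filter_protected_splits_py_spec : Claim_equal_filter_protected_splits_py := by
  intro split_points protected_ranges _
  unfold Spec_filter_protected_splits_py filter_protected_splits_py filter_protected_splits_py_alt
  refine List.filter_congr ?_
  intro p _
  rw [covered_eq]
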